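-- pv_equiv track=rewrite | github.com/dhshin1125/algorithm_study | problem/programmers/lv1/모의고사/정광근.py | solution
-- ===== SOURCE A (Python) =====
-- def solution(answers):
--     one = [1, 2, 3, 4, 5]
--     two = [2, 1, 2, 3, 2, 4, 2, 5]
--     three = [3, 3, 1, 1, 2, 2, 4, 4, 5, 5]
--     ans = []
--     score = [0,0,0]
--
--     for i, answer in enumerate(answers):
--         if one[i%5] == answer:
--             score[0] += 1
--         if two[i%8] == answer:
--             score[1] += 1
--         if three[i%10] == answer:
--             score[2] += 1
--
--     for i, j in enumerate(score):
--         if j == max(score):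
--             ans.append(i+1)
--
--
--     return ans
-- ===== SOURCE B (Python) =====
-- def solution(answers):
--     # Histogram approach: bucket positions by (i % 40, answer) once (40 = lcm of the
--     # three pattern periods), then read each pattern's score off the histogram in O(40).
--     cnt = {}
--     for i, a in enumerate(answers):
--         key = (i % 40, a)
--         cnt[key] = cnt.get(key, 0) + 1
--     patterns = [[1, 2, 3, 4, 5],
--                 [2, 1, 2, 3, 2, 4, 2, 5],
--                 [3, 3, 1, 1, 2, 2, 4, 4, 5, 5]]
--     scores = [sum(cnt.get((j, p[j % len(p)]), 0) for j in range(40)) for p in patterns]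
--     best = max(scores)
--     return [k + 1 for k, s in enumerate(scores) if s == best]
-- ===== Notes on version B (the rewrite author's own statement) =====
-- stated objective: alternative
-- what changed: B buckets positions into a (position mod 40, answer) histogram dictionary in one pass (40 = lcm of the pattern periods) and then reads each pattern's score off the histogram in 40 lookups, instead of A's direct match-testing of all three patterns per element
import Mathlib
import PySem

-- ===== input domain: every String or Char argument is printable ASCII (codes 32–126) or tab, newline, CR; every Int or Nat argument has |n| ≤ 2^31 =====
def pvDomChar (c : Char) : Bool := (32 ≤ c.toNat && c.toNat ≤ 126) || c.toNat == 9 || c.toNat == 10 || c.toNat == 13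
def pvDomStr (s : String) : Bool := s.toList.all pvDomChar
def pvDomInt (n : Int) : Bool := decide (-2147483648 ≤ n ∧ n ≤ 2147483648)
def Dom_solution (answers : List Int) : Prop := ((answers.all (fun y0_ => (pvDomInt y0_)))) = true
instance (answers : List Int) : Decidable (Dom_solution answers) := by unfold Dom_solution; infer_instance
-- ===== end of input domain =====

-- B replaces A's direct per-element pattern matching by a (position mod 40, answer)
-- histogram dictionary read off in 40 lookups per pattern (alternative, same cost).


-- ===== PORT A =====
-- A's single pass: one loop over (index, answer) updating the three counters together.
def aLoop (one two three : List Int) : Nat → List Int → (Int × Int × Int) → (Int × Int × Int)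
  | _, [], s => s
  | i, a :: rest, (s0, s1, s2) =>
      aLoop one two three (i + 1) rest
        ((if one.getD (i % 5) 0 = a then s0 + 1 else s0),
         (if two.getD (i % 8) 0 = a then s1 + 1 else s1),
         (if three.getD (i % 10) 0 = a then s2 + 1 else s2))

-- A's second loop: for i, j in enumerate(score): if j == max(score): ans.append(i+1)
def aSelect (m : Int) : List (Int × Int) → List Int → List Int
  | [], ans => ans
  | (i, j) :: rest, ans => aSelect m rest (if j = m then ans ++ [i + 1] else ans)

def solution (answers : List Int) : List Int :=
  let one : List Int := [1, 2, 3, 4, 5]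
  let two : List Int := [2, 1, 2, 3, 2, 4, 2, 5]
  let three : List Int := [3, 3, 1, 1, 2, 2, 4, 4, 5, 5]
  let s := aLoop one two three 0 answers (0, 0, 0)
  let score : List Int := [s.1, s.2.1, s.2.2]
  aSelect (max s.1 (max s.2.1 s.2.2)) (PySem.List.enumerate score) []

-- ===== PORT B =====
-- B's histogram pass: cnt[(i % 40, a)] = cnt.get((i % 40, a), 0) + 1
def bBuild : Nat → List Int → PySem.Dict (Nat × Int) Int → PySem.Dict (Nat × Int) Int
  | _, [], cnt => cnt
  | i, a :: rest, cnt =>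
      bBuild (i + 1) rest (cnt.insert (i % 40, a) (cnt.getD (i % 40, a) 0 + 1))

-- sum(cnt.get((j, p[j % len(p)]), 0) for j in range(40))
-- (range(40) has nonnegative literal bounds, so List.range 40 is exact here)
def bScore (p : List Int) (cnt : PySem.Dict (Nat × Int) Int) : Int :=
  ((List.range 40).map (fun j => cnt.getD (j, p.getD (j % p.length) 0) 0)).sum

def solution_alt (answers : List Int) : List Int :=
  let cnt := bBuild 0 answers PySem.Dict.empty
  let patterns : List (List Int) :=
    [[1, 2, 3, 4, 5], [2, 1, 2, 3, 2, 4, 2, 5], [3, 3, 1, 1, 2, 2, 4, 4, 5, 5]]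
  let scores : List Int := patterns.map (fun p => bScore p cnt)
  let best : Int := max (scores.getD 0 0) (max (scores.getD 1 0) (scores.getD 2 0))
  (PySem.List.enumerate scores).filterMap (fun ks => if ks.2 = best then some (ks.1 + 1) else none)

-- ===== PRECONDITION & SPEC =====
def Spec_solution (answers : List Int) (out : List Int) : Prop := out = solution_alt answers
instance (answers : List Int) (out : List Int) : Decidable (Spec_solution answers out) := by unfold Spec_solution; infer_instance

-- ===== CLAIM (what is proved, stated in full; the proofs are below) =====
def Claim_equal_solution : Prop := ∀ (answers : List Int), Dom_solution answers → Spec_solution answers (solution answers)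

-- ===== LEMMAS AND PROOFS =====
-- direct count of matches of pattern p against answers starting at position i
def dCount (p : List Int) : Nat → List Int → Int
  | _, [] => 0
  | i, a :: rest => (if p.getD (i % p.length) 0 = a then 1 else 0) + dCount p (i + 1) rest

theorem aLoop_eq_counts (ans : List Int) : ∀ (i : Nat) (x y z : Int),
    aLoop [1, 2, 3, 4, 5] [2, 1, 2, 3, 2, 4, 2, 5] [3, 3, 1, 1, 2, 2, 4, 4, 5, 5] i ans (x, y, z) =
      (x + dCount [1, 2, 3, 4, 5] i ans,
       y + dCount [2, 1, 2, 3, 2, 4, 2, 5] i ans,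
       z + dCount [3, 3, 1, 1, 2, 2, 4, 4, 5, 5] i ans) := by
  induction ans with
  | nil => intro i x y z; simp [aLoop, dCount]
  | cons a rest ih =>
      intro i x y z
      simp only [aLoop, dCount, ih, List.length_cons, List.length_nil]
      split_ifs <;> simp only [Prod.mk.injEq] <;> refine ⟨?_, ?_, ?_⟩ <;> ring

theorem bScore_insert (p : List Int) (hdvd : p.length ∣ 40)
    (cnt : PySem.Dict (Nat × Int) Int) (i : Nat) (a : Int) :
    bScore p (cnt.insert (i % 40, a) (cnt.getD (i % 40, a) 0 + 1)) =
      bScore p cnt + (if p.getD (i % p.length) 0 = a then 1 else 0) := by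
  unfold bScore
  have hconv : ∀ (f : Nat → Int), ((List.range 40).map f).sum = ∑ j ∈ Finset.range 40, f j :=
    fun f => rfl
  rw [hconv, hconv]
  have hstep : ∀ j ∈ Finset.range 40,
      (cnt.insert (i % 40, a) (cnt.getD (i % 40, a) 0 + 1)).getD (j, p.getD (j % p.length) 0) 0 =
        cnt.getD (j, p.getD (j % p.length) 0) 0 +
          (if j = i % 40 ∧ p.getD (j % p.length) 0 = a then 1 else 0) := by
    intro j _
    rw [PySem.Dict.getD_insert]
    by_cases h : j = i % 40 ∧ p.getD (j % p.length) 0 = a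
    · obtain ⟨h1, h2⟩ := h
      subst h1
      rw [h2]
      simp
    · have hne : ¬ ((j, p.getD (j % p.length) 0) = (i % 40, a)) := by
        simpa [Prod.ext_iff] using h
      rw [if_neg hne, if_neg h, add_zero]
  rw [Finset.sum_congr rfl hstep, Finset.sum_add_distrib]
  congr 1
  have hr : i % 40 ∈ Finset.range 40 := by
    simp [Nat.mod_lt _ (by norm_num : 0 < 40)]
  have hmm : i % 40 % p.length = i % p.length := Nat.mod_mod_of_dvd i hdvd
  calc (∑ j ∈ Finset.range 40, if j = i % 40 ∧ p.getD (j % p.length) 0 = a then 1 else 0 : Int)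
      = ∑ j ∈ Finset.range 40,
          (if j = i % 40 then (if p.getD (j % p.length) 0 = a then 1 else 0) else 0 : Int) := by
        apply Finset.sum_congr rfl; intro j _; split_ifs with h1 h2 h3 <;> simp_all
    _ = if p.getD (i % 40 % p.length) 0 = a then 1 else 0 := by
        rw [Finset.sum_ite_eq' (Finset.range 40) (i % 40)]
        simp [hr]
    _ = if p.getD (i % p.length) 0 = a then 1 else 0 := by rw [hmm]

theorem bBuild_score (p : List Int) (hdvd : p.length ∣ 40)
    (ans : List Int) : ∀ (i : Nat) (cnt : PySem.Dict (Nat × Int) Int),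
    bScore p (bBuild i ans cnt) = bScore p cnt + dCount p i ans := by
  induction ans with
  | nil => intro i cnt; simp [bBuild, dCount]
  | cons a rest ih =>
      intro i cnt
      rw [bBuild, ih, bScore_insert p hdvd, dCount]
      ring

theorem select_eq (m c1 c2 c3 : Int) :
    aSelect m (PySem.List.enumerate [c1, c2, c3]) [] =
      (PySem.List.enumerate [c1, c2, c3]).filterMap
        (fun ks => if ks.2 = m then some (ks.1 + 1) else none) := by
  simp only [PySem.List.enumerate_cons, PySem.List.enumerate_nil, aSelect, List.filterMap]
  norm_num [aSelect]
  split_ifs <;> simp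

-- ===== VERDICT (by name: the statement is the Claim_ definition above) =====
theorem solution_spec : Claim_equal_solution := by
  intro answers _
  unfold Spec_solution solution solution_alt
  simp only [aLoop_eq_counts, List.map, List.getD_cons_zero, List.getD_cons_succ, zero_add,
    bBuild_score [1, 2, 3, 4, 5] (by decide),
    bBuild_score [2, 1, 2, 3, 2, 4, 2, 5] (by decide),
    bBuild_score [3, 3, 1, 1, 2, 2, 4, 4, 5, 5] (by decide)]
  norm_num [show bScore [1,2,3,4,5] PySem.Dict.empty = 0 from by decide,
    show bScore [2,1,2,3,2,4,2,5] PySem.Dict.empty = 0 from by decide,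
    show bScore [3,3,1,1,2,2,4,4,5,5] PySem.Dict.empty = 0 from by decide]
  exact select_eq _ _ _ _
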